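-- pv_equiv track=rewrite | github.com/jgd78/Wordle-Solver | quordle solver.py | validpat
-- ===== SOURCE A (Python) =====
-- def validpat(guess, pattern):
--     valid=True
--     for i in range(len(pattern)):
--         tempguess=guess
--         temppattern=pattern
--         let=tempguess[i]
--         if let in tempguess[i+1:] and temppattern[i]==0:
--             tempguess=tempguess[i+1:]
--             temppattern=temppattern[i+1:]
--             numtimes=tempguess.count(let)
--
--             for j in range(numtimes):
--
--                 letpos=tempguess.index(let)
--                 if temppattern[letpos]==1:
--                     valid=False
--                 tempguess=tempguess[letpos+1:]
--                 temppattern=temppattern[letpos+1:]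
--     return valid
-- ===== SOURCE B (Python) =====
-- def validpat(guess, pattern):
--     n = len(pattern)
--     for i in range(n):
--         if pattern[i] == 0:
--             for j in range(i + 1, n):
--                 if pattern[j] == 1 and guess[i] == guess[j]:
--                     return False
--     return True
-- ===== Notes on version B (the rewrite author's own statement) =====
-- stated objective: simpler
-- what changed: A's repeated suffix-slicing with str.index/str.count inner loop is replaced by a flat pairwise scan over index pairs i<j that returns False as soon as pattern[i]==0, pattern[j]==1 and guess[i]==guess[j].
import Mathlib
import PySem

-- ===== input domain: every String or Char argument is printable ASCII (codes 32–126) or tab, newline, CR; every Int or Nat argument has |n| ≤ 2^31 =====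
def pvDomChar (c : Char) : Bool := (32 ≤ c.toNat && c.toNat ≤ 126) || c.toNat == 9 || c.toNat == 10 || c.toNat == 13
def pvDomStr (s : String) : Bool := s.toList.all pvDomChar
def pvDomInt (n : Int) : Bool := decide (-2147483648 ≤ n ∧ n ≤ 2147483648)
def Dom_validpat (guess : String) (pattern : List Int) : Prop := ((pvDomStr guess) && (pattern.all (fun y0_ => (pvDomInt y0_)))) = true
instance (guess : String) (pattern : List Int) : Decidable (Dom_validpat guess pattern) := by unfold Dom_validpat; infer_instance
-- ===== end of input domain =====

-- B replaces A's suffix-slicing str.index/str.count walk by a flat pairwise i<j scan (simpler decomposition, same O(n^2) cost).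


-- ===== PORT A =====
-- inner 'for j in range(numtimes)' loop of A: walks successive occurrences of c via index, slicing both lists past it
def validpatInner (c : Char) : Nat → List Char → List Int → Bool → Bool
  | 0, _, _, v => v
  | n+1, tg, tp, v =>
    match PySem.List.index? tg c with
    | none => v   -- Python would raise ValueError; unreachable (count bounds the loop)
    | some letpos =>
      let v' := if PySem.List.pyGet? tp (letpos : Int) == some 1 then false else v
      validpatInner c n (PySem.List.slice tg (some ((letpos : Int) + 1)) none)
                       (PySem.List.slice tp (some ((letpos : Int) + 1)) none) v'

def validpat (guess : String) (pattern : List Int) : Bool :=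
  let g := guess.toList
  (List.range pattern.length).foldl (fun (valid : Bool) (i : Nat) =>
    match PySem.List.pyGet? g (i : Int) with
    | none => valid   -- Python raises IndexError here; Pre_ excludes these inputs
    | some c =>
      let tg1 := PySem.List.slice g (some ((i : Int) + 1)) none
      if tg1.contains c && (PySem.List.pyGet? pattern (i : Int) == some 0) then
        let tp1 := PySem.List.slice pattern (some ((i : Int) + 1)) none
        validpatInner c (PySem.List.count tg1 c) tg1 tp1 valid
      else valid) true

-- ===== PORT B =====
def validpat_alt (guess : String) (pattern : List Int) : Bool :=
  let g := guess.toList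
  let n := pattern.length
  !((List.range n).any fun i =>
      (PySem.List.pyGet? pattern (i : Int) == some 0) &&
      ((List.range' (i+1) (n - (i+1))).any fun j =>
        PySem.List.pyGet? pattern (j : Int) == some 1 &&
        PySem.List.pyGet? g (i : Int) == PySem.List.pyGet? g (j : Int)))

-- ===== PRECONDITION & SPEC =====
-- Pre_ is exactly where A returns: A raises IndexError whenever guess is shorter than pattern,
-- or some position i with pattern[i]==0 has its letter recur at a position j past pattern's end.
def Pre_validpat (guess : String) (pattern : List Int) : Prop :=
  pattern.length ≤ guess.toList.length ∧
  ∀ i ∈ List.range pattern.length, ∀ j ∈ List.range guess.toList.length, i < j →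
    pattern[i]? = some 0 → guess.toList[j]? = guess.toList[i]? → j < pattern.length
instance (guess : String) (pattern : List Int) : Decidable (Pre_validpat guess pattern) := by
  unfold Pre_validpat; infer_instance

def pvWitness_validpat : String × List Int := ("ab", [0, 1])

def Spec_validpat (guess : String) (pattern : List Int) (out : Bool) : Prop := out = validpat_alt guess pattern
instance (guess : String) (pattern : List Int) (out : Bool) : Decidable (Spec_validpat guess pattern out) := by unfold Spec_validpat; infer_instance

-- ===== CLAIM (what is proved, stated in full; the proofs are below) =====
def Claim_equal_validpat : Prop := ∀ (guess : String) (pattern : List Int), Dom_validpat guess pattern → Pre_validpat guess pattern → Spec_validpat guess pattern (validpat guess pattern)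

-- ===== LEMMAS AND PROOFS =====

-- the pair condition A's pass over position i amounts to, phrased on the zipped suffixes
def pvBad (l : List Char) (p : List Int) (i : Nat) : Bool :=
  (p[i]? == some 0) &&
    (((l.drop (i+1)).zip (p.drop (i+1))).any fun q => (some q.1 == l[i]?) && q.2 == 1)

-- any over a list, phrased by index
lemma any_iff_getElem {α : Type} (L : List α) (f : α → Bool) :
    L.any f = true ↔ ∃ t, ∃ h : t < L.length, f (L[t]) = true := by
  rw [List.any_eq_true]
  constructor
  · rintro ⟨q, hq, hfq⟩
    obtain ⟨t, ht, rfl⟩ := List.mem_iff_getElem.mp hq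
    exact ⟨t, ht, hfq⟩
  · rintro ⟨t, ht, h⟩
    exact ⟨L[t], List.getElem_mem ht, h⟩

-- A's inner occurrence walk, characterised as one scan of the zipped suffixes
lemma validpatInner_eq (c : Char) :
    ∀ (m : Nat) (tg : List Char) (tp : List Int) (v : Bool),
      (∀ t (_ : t < tg.length), tg[t] = c → t < tp.length) → tg.count c = m →
      validpatInner c m tg tp v
        = (v && !((tg.zip tp).any fun q => q.1 == c && q.2 == 1)) := by
  intro m
  induction m with
  | zero =>
    intro tg tp v _ hcnt
    have hnot : c ∉ tg := by rwa [← List.count_eq_zero]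
    have hany : ((tg.zip tp).any fun q => q.1 == c && q.2 == 1) = false := by
      rw [List.any_eq_false]
      rintro ⟨x, y⟩ hxy
      have hx : x ∈ tg := (List.of_mem_zip hxy).1
      have : x ≠ c := fun h => hnot (h ▸ hx)
      simp [this]
    simp [validpatInner, hany]
  | succ m ih =>
    intro tg tp v hocc hcnt
    have hmem : c ∈ tg := by
      have : 0 < tg.count c := by omega
      exact List.count_pos_iff.mp this
    cases hk : PySem.List.index? tg c with
    | none =>
      rw [PySem.List.index?_eq_idxOf?] at hk
      simp [List.idxOf?_eq_none_iff] at hk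
      exact absurd hmem hk
    | some k =>
    obtain ⟨hklen, hgetc, hbefore⟩ := PySem.List.getElem_of_index?_eq_some hk
    have hklen' : k < tp.length := hocc k hklen hgetc
    -- the prefix before k contains no c
    have htake : ∀ x ∈ tg.take k, x ≠ c := by
      intro x hx hxc
      obtain ⟨t, ht, rfl⟩ := List.mem_iff_getElem.mp hx
      have ht' : t < k := by simp at ht; omega
      exact hbefore t ht' (by rw [List.getElem_take] at hxc; exact hxc)
    -- count drops by one past the first occurrence
    have hcnt' : (tg.drop (k+1)).count c = m := by
      have h1 : tg.take (k+1) ++ tg.drop (k+1) = tg := List.take_append_drop _ _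
      have h2 : tg.take (k+1) = tg.take k ++ [tg[k]] := by
        rw [List.take_add_one]
        simp [List.getElem?_eq_getElem hklen]
      have h3 : (tg.take k).count c = 0 := by
        rw [List.count_eq_zero]
        intro hc; exact htake c hc rfl
      have h4 := congrArg (List.count c) h1
      rw [List.count_append, h2, List.count_append, h3, hgetc] at h4
      rw [hcnt] at h4
      simp at h4
      omega
    -- unfold one step of the walk
    have hcast : (k : Int) + 1 = ((k + 1 : Nat) : Int) := by push_cast; ring
    have hget : PySem.List.pyGet? tp (k : Int) = some tp[k] := PySem.List.pyGet?_ofNat tp k hklen'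
    have hstep : validpatInner c (m+1) tg tp v
        = validpatInner c m (tg.drop (k+1)) (tp.drop (k+1))
            (if tp[k] == 1 then false else v) := by
      simp only [validpatInner, hk, hget, hcast, PySem.List.slice_from_natCast]
      simp
    have hocc' : ∀ t (_ : t < (tg.drop (k+1)).length), (tg.drop (k+1))[t] = c
        → t < (tp.drop (k+1)).length := by
      intro t ht htc
      rw [List.getElem_drop] at htc
      have := hocc (k+1+t) (by simp at ht; omega) htc
      simp only [List.length_drop]
      omega
    rw [hstep, ih _ _ _ hocc' hcnt']
    -- split the zip at position k
    have hz : tg.zip tp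
        = (tg.take k).zip (tp.take k) ++ (tg[k], tp[k]) :: (tg.drop (k+1)).zip (tp.drop (k+1)) := by
      conv_lhs => rw [← List.take_append_drop k tg, ← List.take_append_drop k tp]
      rw [List.zip_append (by simp; omega)]
      congr 1
      rw [← List.zip_cons_cons, List.getElem_cons_drop hklen, List.getElem_cons_drop hklen']
    have hany1 : ((tg.take k).zip (tp.take k)).any (fun q => q.1 == c && q.2 == 1) = false := by
      rw [List.any_eq_false]
      rintro ⟨x, y⟩ hxy
      have hx : x ∈ tg.take k := (List.of_mem_zip hxy).1
      simp [htake x hx]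
    rw [hz]
    simp only [List.any_append, List.any_cons, hany1, hgetc]
    cases htp1 : tp[k] == 1 <;>
      cases hrest : ((tg.drop (k+1)).zip (tp.drop (k+1))).any (fun q => q.1 == c && q.2 == 1) <;>
        simp

-- A's loop body at a position i < length, reduced to pvBad
lemma body_eq (l : List Char) (p : List Int) (hle : p.length ≤ l.length)
    (i : Nat) (hi : i < p.length)
    (hbad : ∀ j, j < l.length → i < j → p[i]? = some 0 → l[j]? = l[i]? → j < p.length)
    (v : Bool) :
    (match PySem.List.pyGet? l (i : Int) with
      | none => v
      | some c =>
        if (PySem.List.slice l (some ((i : Int) + 1)) none).contains c && (PySem.List.pyGet? p (i : Int) == some 0) then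
          validpatInner c (PySem.List.count (PySem.List.slice l (some ((i : Int) + 1)) none) c)
            (PySem.List.slice l (some ((i : Int) + 1)) none)
            (PySem.List.slice p (some ((i : Int) + 1)) none) v
        else v)
    = (v && !(pvBad l p i)) := by
  have hil : i < l.length := by omega
  have hgl : PySem.List.pyGet? l (i : Int) = some l[i] := PySem.List.pyGet?_ofNat l i hil
  have hcast : (i : Int) + 1 = ((i + 1 : Nat) : Int) := by push_cast; ring
  have hgi : l[i]? = some l[i] := List.getElem?_eq_getElem hil
  simp only [hgl, hcast, PySem.List.slice_from_natCast, PySem.List.count_eq]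
  by_cases hp0 : p[i]? = some 0
  · have hp0' : PySem.List.pyGet? p (i : Int) = some 0 := by
      rw [PySem.List.pyGet?_ofNat p i hi]
      rw [List.getElem?_eq_getElem hi] at hp0
      simpa using hp0
    by_cases hc : l[i] ∈ l.drop (i+1)
    · rw [if_pos (by simp [hp0', hc])]
      have hocc : ∀ t (_ : t < (l.drop (i+1)).length), (l.drop (i+1))[t] = l[i]
          → t < (p.drop (i+1)).length := by
        intro t ht htc
        have htl : i+1+t < l.length := by simp at ht; omega
        rw [List.getElem_drop] at htc
        have hj := hbad (i+1+t) htl (by omega) hp0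
          (by rw [List.getElem?_eq_getElem htl, List.getElem?_eq_getElem hil, htc])
        simp only [List.length_drop]
        omega
      rw [validpatInner_eq l[i] _ _ _ _ hocc rfl]
      unfold pvBad
      rw [hp0]
      simp only [hgi]
      simp
    · rw [if_neg (by simp [hc])]
      have : (((l.drop (i+1)).zip (p.drop (i+1))).any fun q => (some q.1 == l[i]?) && q.2 == 1) = false := by
        rw [List.any_eq_false]
        rintro ⟨x, y⟩ hxy
        have hx : x ∈ l.drop (i+1) := (List.of_mem_zip hxy).1
        have : x ≠ l[i] := fun h => hc (h ▸ hx)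
        simp [hgi, this]
      simp [pvBad, this]
  · rw [if_neg (by
      rw [PySem.List.pyGet?_ofNat p i hi]
      simp only [Bool.and_eq_true, beq_iff_eq]
      rintro ⟨-, h⟩
      exact hp0 (by rw [List.getElem?_eq_getElem hi, h]))]
    simp [pvBad, hp0]


-- the whole outer loop of A, over any list of in-range indices
lemma loop_eq (l : List Char) (p : List Int) (hle : p.length ≤ l.length)
    (hP : ∀ i, i < p.length → ∀ j, j < l.length → i < j →
      p[i]? = some 0 → l[j]? = l[i]? → j < p.length) :
    ∀ (ns : List Nat) (v : Bool), (∀ i ∈ ns, i < p.length) →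
      ns.foldl (fun (valid : Bool) (i : Nat) =>
        match PySem.List.pyGet? l (i : Int) with
        | none => valid
        | some c =>
          if (PySem.List.slice l (some ((i : Int) + 1)) none).contains c && (PySem.List.pyGet? p (i : Int) == some 0) then
            validpatInner c (PySem.List.count (PySem.List.slice l (some ((i : Int) + 1)) none) c)
              (PySem.List.slice l (some ((i : Int) + 1)) none)
              (PySem.List.slice p (some ((i : Int) + 1)) none) valid
          else valid) v
        = (v && !(ns.any (pvBad l p))) := by
  intro ns
  induction ns with
  | nil => intro v _; simp
  | cons x xs ih =>
    intro v hmem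
    rw [List.foldl_cons,
        body_eq l p hle x (hmem x List.mem_cons_self) (hP x (hmem x List.mem_cons_self)) v,
        ih _ (fun i hi => hmem i (List.mem_cons_of_mem x hi))]
    cases hb : pvBad l p x <;> simp [hb]

-- pvBad coincides with B's guarded inner pairwise scan
lemma pvBad_eq_inner (l : List Char) (p : List Int) (hle : p.length ≤ l.length)
    (i : Nat) (hi : i < p.length) :
    pvBad l p i
      = ((PySem.List.pyGet? p (i : Int) == some 0) &&
         ((List.range' (i+1) (p.length - (i+1))).any fun j =>
            PySem.List.pyGet? p (j : Int) == some 1 &&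
            PySem.List.pyGet? l (i : Int) == PySem.List.pyGet? l (j : Int))) := by
  have hil : i < l.length := by omega
  have hzt : ∀ (t : Nat) (ht : t < ((l.drop (i+1)).zip (p.drop (i+1))).length),
      ((l.drop (i+1)).zip (p.drop (i+1)))[t]'ht = (l[i+1+t]'(by simp at ht; omega), p[i+1+t]'(by simp at ht; omega)) := by
    intro t ht
    rw [List.getElem_zip]
    congr 1 <;> rw [List.getElem_drop]
  unfold pvBad
  rw [show (p[i]? == some 0) = (PySem.List.pyGet? p (i : Int) == some 0) by
    rw [PySem.List.pyGet?_ofNat p i hi, List.getElem?_eq_getElem hi]]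
  congr 1
  rw [Bool.eq_iff_iff]
  constructor
  · intro h
    obtain ⟨t, ht, hq⟩ := (any_iff_getElem _ _).mp h
    have htlen : t < p.length - (i+1) := by
      simp [List.length_zip] at ht
      omega
    have hjl : i + 1 + t < l.length := by omega
    have hjp : i + 1 + t < p.length := by omega
    refine (any_iff_getElem _ _).mpr ⟨t, by simpa using htlen, ?_⟩
    rw [hzt t ht] at hq
    simp only [Bool.and_eq_true, beq_iff_eq] at hq
    rw [List.getElem?_eq_getElem hil] at hq
    rw [List.getElem_range']
    simp only [Nat.one_mul]
    rw [PySem.List.pyGet?_ofNat l i hil,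
        PySem.List.pyGet?_ofNat p (i+1+t) hjp, PySem.List.pyGet?_ofNat l (i+1+t) hjl]
    simp [hq.1, hq.2]
  · intro h
    obtain ⟨t, ht, hq⟩ := (any_iff_getElem _ _).mp h
    have htlen : t < p.length - (i+1) := by simpa using ht
    have hjl : i + 1 + t < l.length := by omega
    have hjp : i + 1 + t < p.length := by omega
    rw [List.getElem_range'] at hq
    simp only [Nat.one_mul] at hq
    rw [PySem.List.pyGet?_ofNat l i hil,
        PySem.List.pyGet?_ofNat p (i+1+t) hjp, PySem.List.pyGet?_ofNat l (i+1+t) hjl] at hq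
    simp only [Bool.and_eq_true, beq_iff_eq, Option.some.injEq] at hq
    obtain ⟨hp1, hll⟩ := hq
    have htz : t < ((l.drop (i+1)).zip (p.drop (i+1))).length := by
      simp [List.length_zip]; omega
    refine (any_iff_getElem _ _).mpr ⟨t, htz, ?_⟩
    rw [hzt t htz]
    simp [List.getElem?_eq_getElem hil, hll, hp1]

-- ===== VERDICT (by name: the statement is the Claim_ definition above) =====
theorem validpat_spec : Claim_equal_validpat := by
  intro guess pattern _hdom hpre
  unfold Spec_validpat
  simp only [validpat, validpat_alt]
  obtain ⟨hle, hP⟩ := hpre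
  rw [loop_eq guess.toList pattern hle
      (fun i hi j hj => hP i (List.mem_range.mpr hi) j (List.mem_range.mpr hj))
      (List.range pattern.length) true (fun i hi => List.mem_range.mp hi)]
  simp only [Bool.true_and]
  suffices h : (List.range pattern.length).any (pvBad guess.toList pattern)
      = ((List.range pattern.length).any fun i =>
          (PySem.List.pyGet? pattern (i : Int) == some 0) &&
          ((List.range' (i + 1) (pattern.length - (i + 1))).any fun j =>
            PySem.List.pyGet? pattern (j : Int) == some 1 &&
            PySem.List.pyGet? guess.toList (i : Int) == PySem.List.pyGet? guess.toList (j : Int))) by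
    rw [h]
  rw [Bool.eq_iff_iff, List.any_eq_true, List.any_eq_true]
  constructor
  · rintro ⟨i, hi, hb⟩
    refine ⟨i, hi, ?_⟩
    rw [← pvBad_eq_inner guess.toList pattern hle i (List.mem_range.mp hi)]
    exact hb
  · rintro ⟨i, hi, hb⟩
    refine ⟨i, hi, ?_⟩
    rw [pvBad_eq_inner guess.toList pattern hle i (List.mem_range.mp hi)]
    exact hb
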